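-- pv_equiv track=rewrite | github.com/HxD3ilx/shellcode | generator.py | build_string_no_nulls
-- ===== SOURCE A (Python) =====
-- def build_string_no_nulls(string, dest_reg="ebx"):
--     """
--     Build a NULL-terminated string on the stack without NULL bytes in the code.
--
--     Args:
--         string (str): The string to build
--         dest_reg (str): Register that will hold the pointer to the string
--
--     Returns:
--         list: List of tuples containing assembly instructions and explanations
--     """
--     lines = []
--
--     byte_array = [ord(char) for char in string]
--     byte_array.append(0x00)
--     null_index = len(byte_array) - 1
--
--     while len(byte_array) % 4 != 0:
--         byte_array.append(0x41)
--
--     dwords = []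
--     for i in range(0, len(byte_array), 4):
--         dword = 0
--         for j in range(4):
--             byte_val = byte_array[i + j]
--             if byte_val == 0x00:
--                 byte_val = 0x01
--             dword |= (byte_val << (8 * j))
--         dwords.append(dword & 0xFFFFFFFF)
--
--     # Push all dwords - each push builds part of the string
--     for idx, dword in enumerate(reversed(dwords)):
--         # Extract bytes from dword (little-endian: LSB first)
--         ascii_str = ""
--         for i in range(4):
--             byte_val = (dword >> (i * 8)) & 0xFF
--             # Skip padding (0x41) and NULL placeholder (0x01)
--             if byte_val == 0x41 or byte_val == 0x01:
--                 continue
--             if byte_val == 0x00: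
--                 break
--             if 32 <= byte_val <= 126:  # Printable ASCII
--                 ascii_str += chr(byte_val)
--             else:
--                 # Non-printable byte found, stop
--                 break
--
--         # Format comment: show hex value and ASCII representation
--         if ascii_str:
--             comment = f"0x{dword:08x} = \"{ascii_str}\""
--         else:
--             comment = f"0x{dword:08x}"
--
--         lines.append((f"push 0x{dword:08x}", comment))
--
--     # Set pointer and NULL terminator
--     lines.append((f"mov {dest_reg}, esp", f"Store string pointer in {dest_reg.upper()}"))
--     lines.append(("xor eax, eax", ""))
--     lines.append((f"mov byte ptr [{dest_reg} + {hex(null_index)}], al", "Write NULL terminator"))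
--
--     return lines
-- ===== SOURCE B (Python) =====
-- def build_string_no_nulls(string, dest_reg="ebx"):
--     # Back-to-front emitter over a pre-substituted payload string:
--     # the NULL terminator is materialised as "\x01" and padding as "A" up front,
--     # each push line is produced directly from its 4-char chunk (dword via
--     # int.from_bytes, comment via filter + take-while over the chunk's chars),
--     # walking the payload from the end so the lines come out already in push order.
--     null_index = len(string)
--     payload = string + "\x01" + "A" * (-(len(string) + 1) % 4)
--
--     def chunk_line(chunk):
--         dword = int.from_bytes(chunk.encode("ascii"), "little")
--         shown = ""
--         for ch in [c for c in chunk if c not in "\x01A"]: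
--             if " " <= ch <= "~":
--                 shown += ch
--             else:
--                 break
--         comment = f'0x{dword:08x} = "{shown}"' if shown else f"0x{dword:08x}"
--         return (f"push 0x{dword:08x}", comment)
--
--     lines = []
--     i = len(payload)
--     while i:
--         lines.append(chunk_line(payload[i - 4:i]))
--         i -= 4
--
--     return lines + [
--         (f"mov {dest_reg}, esp", f"Store string pointer in {dest_reg.upper()}"),
--         ("xor eax, eax", ""),
--         (f"mov byte ptr [{dest_reg} + {hex(null_index)}], al", "Write NULL terminator"),
--     ]
-- ===== Notes on version B (the rewrite author's own statement) =====
-- stated objective: alternative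
-- what changed: B replaces A's staged passes (in-place padded byte list, indexed dword-packing loop, then re-extracting every byte of each dword under reversed()/enumerate) by a pre-substituted payload string (terminator as "\x01", padding as "A") walked from the end in 4-char chunks, producing each push line directly in push order with no intermediate dword list and no byte re-extraction (dword via int.from_bytes, comment via filter + take-while over the chunk's chars).
import Mathlib
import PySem

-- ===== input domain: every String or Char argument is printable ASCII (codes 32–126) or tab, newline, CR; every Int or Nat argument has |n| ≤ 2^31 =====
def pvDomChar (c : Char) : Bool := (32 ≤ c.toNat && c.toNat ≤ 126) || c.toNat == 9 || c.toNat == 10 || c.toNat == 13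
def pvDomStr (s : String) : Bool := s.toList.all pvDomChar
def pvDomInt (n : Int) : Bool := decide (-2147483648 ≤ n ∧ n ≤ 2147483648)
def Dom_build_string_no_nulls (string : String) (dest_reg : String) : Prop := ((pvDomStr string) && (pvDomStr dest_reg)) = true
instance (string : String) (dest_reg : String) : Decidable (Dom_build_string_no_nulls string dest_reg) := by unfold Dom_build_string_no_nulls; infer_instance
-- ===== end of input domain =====

-- B replaces A's staged index loops and reversed() over an intermediate dword list by a
-- pre-substituted payload string consumed by a back-to-front recursion, emitting each push
-- line directly from its last 4-char chunk; objective: alternative decomposition, not speed.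

-- ===== shared formatting helpers (hex rendering of f"{d:08x}" and hex(n)) =====

-- one lowercase hex digit (n < 16)
def pvHexDigit (n : Nat) : Char := Char.ofNat (if n < 10 then 48 + n else 87 + n)

-- lowercase hex digits of n, empty for 0 (exact: most-significant first)
def pvHexDigits (n : Nat) : List Char :=
  if h : n = 0 then [] else pvHexDigits (n / 16) ++ [pvHexDigit (n % 16)]
  termination_by n
  decreasing_by exact Nat.div_lt_self (Nat.pos_of_ne_zero h) (by omega)

-- f"{d:08x}" for 0 ≤ d (zero-padded to 8 digits; exact there)
def pvHex8 (d : Int) : List Char :=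
  let ds := pvHexDigits d.toNat
  List.replicate (8 - ds.length) '0' ++ ds

-- hex(n) for 0 ≤ n (exact there)
def pvPyHex (n : Int) : List Char :=
  '0' :: 'x' :: (if n = 0 then ['0'] else pvHexDigits n.toNat)

-- ===== PORT A =====

-- while len(byte_array) % 4 != 0: byte_array.append(0x41)
def pvPadA (l : List Int) : List Int :=
  if l.length % 4 ≠ 0 then pvPadA (l ++ [0x41]) else l
  termination_by (4 - l.length % 4) % 4
  decreasing_by simp; omega

-- inner 'for j in range(4): … dword |= byte_val << (8*j)' (index always in range: length is a
-- multiple of 4 and i+j < length, so the .getD 0 default is never read)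
def pvDwordA (byte_array : List Int) (i : Int) : Int :=
  (PySem.List.pyRange 0 4 1).foldl (fun dword j =>
    let byte_val := (PySem.List.pyGet? byte_array (i + j)).getD 0
    let byte_val := if byte_val = 0 then 1 else byte_val
    PySem.Int.bor dword (byte_val <<< (8 * j).toNat)) 0

-- 'for i in range(4): …' comment loop with its breaks, over dword
def pvAsciiA (dword : Int) : List Int → List Char → List Char
  | [], acc => acc
  | i :: rest, acc =>
    let byte_val := PySem.Int.band (dword >>> (i * 8).toNat) 0xFF
    if byte_val = 0x41 ∨ byte_val = 0x01 then pvAsciiA dword rest acc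
    else if byte_val = 0 then acc
    else if 32 ≤ byte_val ∧ byte_val ≤ 126 then pvAsciiA dword rest (acc ++ [Char.ofNat byte_val.toNat])
    else acc

def build_string_no_nulls (string : String) (dest_reg : String) : List (String × String) :=
  let byte_array : List Int := string.toList.map (fun c => (c.toNat : Int)) ++ [0]
  let null_index : Int := (byte_array.length : Int) - 1
  let byte_array := pvPadA byte_array
  let dwords : List Int := (PySem.List.pyRange 0 (byte_array.length : Int) 4).foldl
    (fun dwords i => dwords ++ [PySem.Int.band (pvDwordA byte_array i) 0xFFFFFFFF]) []
  let lines : List (String × String) := (PySem.List.enumerate dwords.reverse).foldl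
    (fun lines p =>
      let dword := p.2
      let ascii_str := pvAsciiA dword (PySem.List.pyRange 0 4 1) []
      let comment : List Char :=
        if ascii_str ≠ [] then ('0' :: 'x' :: pvHex8 dword) ++ (' ' :: '=' :: ' ' :: '"' :: ascii_str) ++ ['"']
        else '0' :: 'x' :: pvHex8 dword
      lines ++ [(String.ofList ('p' :: 'u' :: 's' :: 'h' :: ' ' :: '0' :: 'x' :: pvHex8 dword), String.ofList comment)]) []
  lines
    ++ [(String.ofList (('m' :: 'o' :: 'v' :: ' ' :: dest_reg.toList) ++ [',', ' ', 'e', 's', 'p']),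
         String.ofList ("Store string pointer in ".toList ++ PySem.Chars.upper dest_reg.toList))]
    ++ [("xor eax, eax", "")]
    ++ [(String.ofList (("mov byte ptr [".toList ++ dest_reg.toList) ++ (' ' :: '+' :: ' ' :: pvPyHex null_index) ++ [']', ',', ' ', 'a', 'l']),
         "Write NULL terminator")]

-- ===== PORT B =====

-- 'for ch in […]: if " " <= ch <= "~": shown += ch else: break'
def pvShown : List Char → List Char
  | [] => []
  | c :: rest => if 32 ≤ c.toNat ∧ c.toNat ≤ 126 then c :: pvShown rest else []

-- chunk_line: dword = int.from_bytes(chunk, 'little'); comment from the filtered chunk chars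
def pvChunkLine (chunk : List Char) : String × String :=
  let dword : Int := chunk.foldr (fun c acc => acc * 256 + (c.toNat : Int)) 0
  let shown : List Char := pvShown (chunk.filter (fun c => !(c == Char.ofNat 1 || c == 'A')))
  let comment : List Char :=
    if shown ≠ [] then ('0' :: 'x' :: pvHex8 dword) ++ (' ' :: '=' :: ' ' :: '"' :: shown) ++ ['"']
    else '0' :: 'x' :: pvHex8 dword
  (String.ofList ('p' :: 'u' :: 's' :: 'h' :: ' ' :: '0' :: 'x' :: pvHex8 dword), String.ofList comment)

-- 'i = len(payload); while i: lines.append(chunk_line(payload[i-4:i])); i -= 4'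
-- (payload[i-4:i] ported as drop/take: exact here, i is always a positive multiple of 4)
def pvEmitIdx (payload : List Char) (i : Nat) : List (String × String) :=
  if i = 0 then []
  else pvChunkLine ((payload.drop (i - 4)).take 4) :: pvEmitIdx payload (i - 4)
  termination_by i
  decreasing_by omega

def build_string_no_nulls_alt (string : String) (dest_reg : String) : List (String × String) :=
  let null_index : Int := (string.toList.length : Int)
  let payload : List Char := string.toList ++ [Char.ofNat 1]
    ++ List.replicate (PySem.Int.mod (-((string.toList.length : Int) + 1)) 4).toNat 'A'
  pvEmitIdx payload payload.length
    ++ [(String.ofList (('m' :: 'o' :: 'v' :: ' ' :: dest_reg.toList) ++ [',', ' ', 'e', 's', 'p']),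
         String.ofList ("Store string pointer in ".toList ++ PySem.Chars.upper dest_reg.toList))]
    ++ [("xor eax, eax", "")]
    ++ [(String.ofList (("mov byte ptr [".toList ++ dest_reg.toList) ++ (' ' :: '+' :: ' ' :: pvPyHex null_index) ++ [']', ',', ' ', 'a', 'l']),
         "Write NULL terminator")]

-- ===== PRECONDITION & SPEC =====
def Spec_build_string_no_nulls (string : String) (dest_reg : String) (out : List (String × String)) : Prop := out = build_string_no_nulls_alt string dest_reg
instance (string : String) (dest_reg : String) (out : List (String × String)) : Decidable (Spec_build_string_no_nulls string dest_reg out) := by unfold Spec_build_string_no_nulls; infer_instance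

-- ===== CLAIM (what is proved, stated in full; the proofs are below) =====
def Claim_equal_build_string_no_nulls : Prop := ∀ (string : String) (dest_reg : String), Dom_build_string_no_nulls string dest_reg → Spec_build_string_no_nulls string dest_reg (build_string_no_nulls string dest_reg)

-- ===== LEMMAS AND PROOFS =====

theorem pv_or_shift (a b k : Nat) (h : a < 2^k) : a ||| (b <<< k) = a + b * 2^k := by
  apply Nat.eq_of_testBit_eq
  intro i
  rw [Nat.testBit_lor, Nat.testBit_shiftLeft, show a + b * 2^k = 2^k * b + a by ring,
    Nat.testBit_two_pow_mul_add b h i]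
  by_cases hi : i < k
  · simp [hi, Nat.not_le.mpr hi]
  · have ha : a.testBit i = false :=
      Nat.testBit_lt_two_pow (lt_of_lt_of_le h (Nat.pow_le_pow_right (by omega) (Nat.le_of_not_lt hi)))
    simp [hi, Nat.le_of_not_lt hi, ha]

theorem pv_and255 (x : Nat) : x &&& 255 = x % 256 := by
  have := Nat.and_two_pow_sub_one_eq_mod x 8; norm_num at this; omega

theorem pv_pack (n0 n1 n2 n3 : Nat) (h0 : n0 < 256) (h1 : n1 < 256) (h2 : n2 < 256) (h3 : n3 < 256) :
    ((n0 ||| n1 <<< 8) ||| n2 <<< 16) ||| n3 <<< 24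
      = n0 + n1 * 256 + n2 * 65536 + n3 * 16777216 := by
  rw [pv_or_shift n0 n1 8 (by omega),
      pv_or_shift _ n2 16 (by norm_num; omega),
      pv_or_shift _ n3 24 (by norm_num; omega)]
  norm_num

theorem pv_extract (n0 n1 n2 n3 : Nat) (h0 : n0 < 256) (h1 : n1 < 256) (h2 : n2 < 256) (h3 : n3 < 256) :
    let D := n0 + n1 * 256 + n2 * 65536 + n3 * 16777216
    (D >>> 0) &&& 255 = n0 ∧ (D >>> 8) &&& 255 = n1 ∧ (D >>> 16) &&& 255 = n2 ∧
      (D >>> 24) &&& 255 = n3 ∧ D &&& 4294967295 = D := by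
  intro D
  have hm : D &&& 4294967295 = D % 4294967296 := by
    have := Nat.and_two_pow_sub_one_eq_mod D 32; norm_num at this; omega
  simp only [Nat.shiftRight_eq_div_pow, pv_and255, hm]
  norm_num
  omega

theorem pv_pyRange4 : PySem.List.pyRange 0 4 1 = [0, 1, 2, 3] := by decide

-- 'b if b != 0x00 else 0x01' (A's substitution, as a function; proof-side only)
def pvSub (b : Int) : Int := if b ≠ 0 then b else 1

theorem pv_sub_eq (b : Int) : (if b = 0 then (1:Int) else b) = pvSub b := by
  unfold pvSub; split_ifs <;> simp_all

theorem pv_zero_bor (a : Int) : PySem.Int.bor 0 a = a := by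
  rw [PySem.Int.bor_comm]; simp

theorem pv_dwordA_chunk (b0 b1 b2 b3 : Int) (rest : List Int) :
    pvDwordA (b0 :: b1 :: b2 :: b3 :: rest) 0 =
      PySem.Int.bor (PySem.Int.bor (PySem.Int.bor (pvSub b0) (pvSub b1 <<< (8:Nat))) (pvSub b2 <<< (16:Nat))) (pvSub b3 <<< (24:Nat)) := by
  simp [pvDwordA, pv_pyRange4, pysem, pv_zero_bor, pv_sub_eq]

theorem pv_cast_shiftl (m k : Nat) : ((m : Int) <<< k) = ((m <<< k : Nat) : Int) := rfl
theorem pv_cast_shiftr (m k : Nat) : ((m : Int) >>> k) = ((m >>> k : Nat) : Int) := rfl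

theorem pv_dword_facts (c0 c1 c2 c3 : Int)
    (h0 : 1 ≤ c0 ∧ c0 < 128) (h1 : 1 ≤ c1 ∧ c1 < 128) (h2 : 1 ≤ c2 ∧ c2 < 128) (h3 : 1 ≤ c3 ∧ c3 < 128) :
    let d := PySem.Int.bor (PySem.Int.bor (PySem.Int.bor c0 (c1 <<< (8:Nat))) (c2 <<< (16:Nat))) (c3 <<< (24:Nat))
    PySem.Int.band d 4294967295 = d ∧
      PySem.Int.band (d >>> (0:Nat)) 255 = c0 ∧ PySem.Int.band (d >>> (8:Nat)) 255 = c1 ∧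
      PySem.Int.band (d >>> (16:Nat)) 255 = c2 ∧ PySem.Int.band (d >>> (24:Nat)) 255 = c3 ∧
      d = c0 + c1 * 256 + c2 * 65536 + c3 * 16777216 := by
  intro d
  have e0 : c0 = ((c0.toNat : Nat) : Int) := (Int.toNat_of_nonneg (by omega)).symm
  have e1 : c1 = ((c1.toNat : Nat) : Int) := (Int.toNat_of_nonneg (by omega)).symm
  have e2 : c2 = ((c2.toNat : Nat) : Int) := (Int.toNat_of_nonneg (by omega)).symm
  have e3 : c3 = ((c3.toNat : Nat) : Int) := (Int.toNat_of_nonneg (by omega)).symm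
  set n0 := c0.toNat; set n1 := c1.toNat; set n2 := c2.toNat; set n3 := c3.toNat
  have b0 : n0 < 256 := by omega
  have b1 : n1 < 256 := by omega
  have b2 : n2 < 256 := by omega
  have b3 : n3 < 256 := by omega
  have hd : d = (((((n0 ||| n1 <<< 8) ||| n2 <<< 16) ||| n3 <<< 24 : Nat)) : Int) := by
    simp only [d, e0, e1, e2, e3, pv_cast_shiftl, PySem.Int.bor_natCast]
  obtain ⟨x0, x8, x16, x24, xm⟩ := pv_extract n0 n1 n2 n3 b0 b1 b2 b3
  rw [pv_pack n0 n1 n2 n3 b0 b1 b2 b3] at hd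
  refine ⟨?_, ?_, ?_, ?_, ?_, ?_⟩ <;>
    rw [hd] <;> try
    (simp only [pv_cast_shiftr, show ((4294967295:Int)) = ((4294967295:Nat):Int) from rfl,
      show ((255:Int)) = ((255:Nat):Int) from rfl, PySem.Int.band_natCast])
  · omega
  · rw [x0]; omega
  · rw [x8]; omega
  · rw [x16]; omega
  · rw [x24]; omega
  · push_cast; omega

theorem pv_ascii_step (D c i : Int) (is : List Int) (acc : List Char)
    (hbyte : PySem.Int.band (D >>> (i * 8).toNat) 255 = c) (hc : 1 ≤ c) :
    pvAsciiA D (i :: is) acc =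
      if c = 65 ∨ c = 1 then pvAsciiA D is acc
      else if 32 ≤ c ∧ c ≤ 126 then pvAsciiA D is (acc ++ [Char.ofNat c.toNat])
      else acc := by
  simp only [pvAsciiA, hbyte]
  split_ifs <;> first | rfl | omega

-- Char code roundtrip on the ASCII range
theorem pv_ofNat_toNat (c : Char) (h : c.toNat < 128) : Char.ofNat c.toNat = c := by
  apply Char.ext
  simp only [Char.ofNat, Char.toNat] at *
  rw [dif_pos (by constructor; omega)]
  simp only [Char.ofNatAux]
  exact UInt32.toFin_inj.mp rfl

theorem pv_char_eq_iff (c : Char) (n : Nat) (hn : n < 128) (hc : c.toNat < 128) :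
    c = Char.ofNat n ↔ c.toNat = n := by
  constructor
  · rintro rfl
    simp only [Char.toNat, Char.ofNat]
    rw [dif_pos (by constructor; omega)]
    simp only [Char.ofNatAux]
    have : (UInt32.ofNatLT n (Nat.lt_of_lt_of_le hn (by norm_num))).toNat = n := rfl
    exact this
  · rintro rfl
    exact (pv_ofNat_toNat c hc).symm

-- A's comment loop over the dword equals B's filter + take-while over the chunk chars
theorem pv_ascii_shown (D : Int) : ∀ (is : List Int) (cs : List Char),
    List.Forall₂ (fun i c => PySem.Int.band (@HShiftRight.hShiftRight Int Nat Int Int.instHShiftRightNat D (i * 8).toNat) 255 = ((c.toNat : Int)) ∧ 1 ≤ c.toNat ∧ c.toNat < 128) is cs →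
    ∀ acc, pvAsciiA D is acc = acc ++ pvShown (cs.filter (fun c => !(c == Char.ofNat 1 || c == 'A'))) := by
  intro is cs h
  induction h with
  | nil => intro acc; simp [pvAsciiA, pvShown]
  | @cons i c is' cs' hic _ ih =>
    intro acc
    obtain ⟨hb, h1, h128⟩ := hic
    rw [pv_ascii_step D ((c.toNat : Int)) i is' acc hb (by omega)]
    have heq1 : (c == Char.ofNat 1) = decide (c.toNat = 1) := by
      rw [Bool.eq_iff_iff]; simp [pv_char_eq_iff c 1 (by omega) h128]
    have heq65 : (c == 'A') = decide (c.toNat = 65) := by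
      rw [Bool.eq_iff_iff]
      rw [show 'A' = Char.ofNat 65 from by decide]
      simp [pv_char_eq_iff c 65 (by omega) h128]
    by_cases hskip : c.toNat = 65 ∨ c.toNat = 1
    · rw [if_pos (by omega), List.filter_cons_of_neg (by simp [heq1, heq65]; omega), ih acc]
    · rw [if_neg (by omega), List.filter_cons_of_pos (by simp [heq1, heq65]; omega)]
      by_cases hpr : 32 ≤ c.toNat ∧ c.toNat ≤ 126
      · rw [if_pos (by omega)]
        have : Char.ofNat ((c.toNat : Int)).toNat = c := by
          rw [Int.toNat_natCast]; exact pv_ofNat_toNat c h128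
        rw [this, ih (acc ++ [c])]
        simp [pvShown, hpr]
      · rw [if_neg (by omega)]
        simp only [pvShown]
        rw [if_neg (by omega)]
        simp

-- comment text from a dword (A recomputes it inside its push loop)
def pvCommentOf (D : Int) : List Char :=
  let ascii_str := pvAsciiA D (PySem.List.pyRange 0 4 1) []
  if ascii_str ≠ [] then ('0' :: 'x' :: pvHex8 D) ++ (' ' :: '=' :: ' ' :: '"' :: ascii_str) ++ ['"']
  else '0' :: 'x' :: pvHex8 D

-- intermediate characterisation: per-chunk (dword, comment) entries in string order
def pvEntryA (l : List Int) (i : Int) : Int × List Char :=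
  let D := PySem.Int.band (pvDwordA l i) 4294967295
  (D, pvCommentOf D)

-- rendering an entry as a push line
def pvToLine (e : Int × List Char) : String × String :=
  (String.ofList ('p' :: 'u' :: 's' :: 'h' :: ' ' :: '0' :: 'x' :: pvHex8 e.1), String.ofList e.2)

theorem pv_chunk_line (c0 c1 c2 c3 : Char)
    (h0 : 1 ≤ c0.toNat ∧ c0.toNat < 128) (h1 : 1 ≤ c1.toNat ∧ c1.toNat < 128)
    (h2 : 1 ≤ c2.toNat ∧ c2.toNat < 128) (h3 : 1 ≤ c3.toNat ∧ c3.toNat < 128) :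
    pvChunkLine [c0, c1, c2, c3]
      = pvToLine (pvEntryA [(c0.toNat : Int), (c1.toNat : Int), (c2.toNat : Int), (c3.toNat : Int)] 0) := by
  have hs : ∀ c : Char, 1 ≤ c.toNat → pvSub ((c.toNat : Int)) = ((c.toNat : Int)) := by
    intro c hc; unfold pvSub; rw [if_pos (by omega)]
  obtain ⟨hm, x0, x8, x16, x24, hval⟩ := pv_dword_facts ((c0.toNat:Int)) ((c1.toNat:Int)) ((c2.toNat:Int)) ((c3.toNat:Int))
    (by omega) (by omega) (by omega) (by omega)
  rw [pvChunkLine, pvEntryA, pv_dwordA_chunk, hs c0 h0.1, hs c1 h1.1, hs c2 h2.1, hs c3 h3.1, hm]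
  have hascii : pvAsciiA (PySem.Int.bor (PySem.Int.bor (PySem.Int.bor ((c0.toNat:Int)) (((c1.toNat:Int)) <<< (8:Nat))) (((c2.toNat:Int)) <<< (16:Nat))) (((c3.toNat:Int)) <<< (24:Nat)))
      (PySem.List.pyRange 0 4 1) []
      = pvShown (([c0, c1, c2, c3].filter (fun c => !(c == Char.ofNat 1 || c == 'A')))) := by
    rw [pv_pyRange4]
    refine pv_ascii_shown _ _ _ ?_ []
    refine .cons ⟨?_, h0.1, h0.2⟩ (.cons ⟨?_, h1.1, h1.2⟩ (.cons ⟨?_, h2.1, h2.2⟩ (.cons ⟨?_, h3.1, h3.2⟩ .nil)))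
    · simpa using x0
    · simpa using x8
    · simpa using x16
    · simpa using x24
  have hfold : ([c0, c1, c2, c3].foldr (fun c acc => acc * 256 + (c.toNat : Int)) 0)
      = PySem.Int.bor (PySem.Int.bor (PySem.Int.bor ((c0.toNat:Int)) (((c1.toNat:Int)) <<< (8:Nat))) (((c2.toNat:Int)) <<< (16:Nat))) (((c3.toNat:Int)) <<< (24:Nat)) := by
    simp only [List.foldr]
    rw [hval]; ring
  rw [pvToLine, pvCommentOf, hascii, hfold]

-- pvEntriesMid: per-chunk entries of a 4-multiple list, front to back (proof-side spec)
def pvEntriesMid : List Int → List (Int × List Char)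
  | b0 :: b1 :: b2 :: b3 :: rest => pvEntryA (b0 :: b1 :: b2 :: b3 :: rest) 0 :: pvEntriesMid rest
  | _ => []

theorem pv_pyGet_cons {α : Type} (x : α) (l : List α) (i : Int) (hi : 0 ≤ i) :
    PySem.List.pyGet? (x :: l) (i + 1) = PySem.List.pyGet? l i := by
  lift i to Nat using hi
  exact PySem.List.pyGet?_cons_succ x l i

theorem pv_dwordA_cons (x : Int) (l : List Int) (i : Int) (hi : 0 ≤ i) :
    pvDwordA (x :: l) (i + 1) = pvDwordA l i := by
  simp only [pvDwordA, pv_pyRange4, List.foldl]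
  rw [show i + 1 + (0:Int) = (i + 0) + 1 by ring, show i + 1 + (1:Int) = (i + 1) + 1 by ring,
    show i + 1 + (2:Int) = (i + 2) + 1 by ring, show i + 1 + (3:Int) = (i + 3) + 1 by ring,
    pv_pyGet_cons x l (i+0) (by omega), pv_pyGet_cons x l (i+1) (by omega),
    pv_pyGet_cons x l (i+2) (by omega), pv_pyGet_cons x l (i+3) (by omega)]

theorem pv_dwordA_shift4 (b0 b1 b2 b3 : Int) (rest : List Int) (i : Int) (hi : 0 ≤ i) :
    pvDwordA (b0 :: b1 :: b2 :: b3 :: rest) (i + 4) = pvDwordA rest i := by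
  rw [show i + 4 = (i + 3) + 1 by ring, pv_dwordA_cons _ _ _ (by omega),
    show i + 3 = (i + 2) + 1 by ring, pv_dwordA_cons _ _ _ (by omega),
    show i + 2 = (i + 1) + 1 by ring, pv_dwordA_cons _ _ _ (by omega),
    pv_dwordA_cons _ _ _ hi]

-- A's dword loop (over range(0, len, 4)) produces exactly pvEntriesMid's entries
theorem pv_entries : ∀ (k : Nat) (l : List Int), l.length = 4 * k →
    (List.range k).map (fun (t : Nat) => pvEntryA l (4 * (t : Int))) = pvEntriesMid l := by
  intro k
  induction k with
  | zero =>
    intro l hl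
    rw [List.length_eq_zero_iff.mp hl]
    rfl
  | succ k ih =>
    intro l hl
    rcases l with _ | ⟨b0, _ | ⟨b1, _ | ⟨b2, _ | ⟨b3, rest⟩⟩⟩⟩ <;> simp only [List.length_cons, List.length_nil] at hl <;> try omega
    have hrest : rest.length = 4 * k := by omega
    have htail : List.map ((fun (t : Nat) => pvEntryA (b0 :: b1 :: b2 :: b3 :: rest) (4 * (t : Int))) ∘ Nat.succ) (List.range k)
        = pvEntriesMid rest := by
      rw [← ih rest hrest]
      refine List.map_congr_left ?_
      intro t _
      simp only [Function.comp]
      have h4 : (4 : Int) * ((t : Nat).succ : Int) = 4 * (t : Int) + 4 := by push_cast; ring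
      simp only [pvEntryA, h4, pv_dwordA_shift4 b0 b1 b2 b3 rest (4 * (t : Int)) (by positivity)]
    rw [pvEntriesMid, List.range_succ_eq_map, List.map_cons, List.map_map, htail]
    norm_num

theorem pv_mid_append : ∀ (k : Nat) (l1 l2 : List Int), l1.length = 4 * k →
    pvEntriesMid (l1 ++ l2) = pvEntriesMid l1 ++ pvEntriesMid l2 := by
  intro k
  induction k with
  | zero =>
    intro l1 l2 h
    rw [List.length_eq_zero_iff.mp h]
    rfl
  | succ k ih =>
    intro l1 l2 h
    rcases l1 with _ | ⟨b0, _ | ⟨b1, _ | ⟨b2, _ | ⟨b3, rest⟩⟩⟩⟩ <;> simp only [List.length_cons, List.length_nil] at h <;> try omega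
    have hrest : rest.length = 4 * k := by omega
    simp only [List.cons_append, pvEntriesMid, ih rest l2 hrest]
    congr 1
    simp only [pvEntryA, pv_dwordA_chunk]

-- B's back-to-front index loop = reversed rendering of pvEntriesMid over the char codes
theorem pv_emitIdx_eq : ∀ (k : Nat) (p rest payload : List Char), payload = p ++ rest →
    p.length = 4 * k → (∀ c ∈ p, 1 ≤ c.toNat ∧ c.toNat < 128) →
    pvEmitIdx payload (4 * k) = ((pvEntriesMid (p.map (fun c => (c.toNat : Int)))).reverse.map pvToLine) := by
  intro k
  induction k with
  | zero =>
    intro p rest payload hpay hl _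
    rw [List.length_eq_zero_iff.mp hl]
    simp [pvEmitIdx, pvEntriesMid]
  | succ k ih =>
    intro p rest payload hpay hl hb
    have hq : p = p.take (4 * k) ++ p.drop (4 * k) := (List.take_append_drop _ p).symm
    set q := p.take (4 * k) with hqdef
    set chunk := p.drop (4 * k) with hcdef
    have hql : q.length = 4 * k := by
      rw [hqdef, List.length_take]; omega
    have hcl : chunk.length = 4 := by
      rw [hcdef, List.length_drop]; omega
    rw [pvEmitIdx, if_neg (by omega : ¬ 4 * (k + 1) = 0),
      show 4 * (k + 1) - 4 = 4 * k by omega]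
    have hdropPay : payload.drop (4 * k) = chunk ++ rest := by
      rw [hpay, hq, List.append_assoc, ← hql, List.drop_left]
    have htake : (chunk ++ rest).take 4 = chunk := by
      rw [← hcl, List.take_left]
    have hbq : ∀ c ∈ q, 1 ≤ c.toNat ∧ c.toNat < 128 := by
      intro c hc; exact hb c (by rw [hq]; exact List.mem_append.mpr (Or.inl hc))
    have hbc : ∀ c ∈ chunk, 1 ≤ c.toNat ∧ c.toNat < 128 := by
      intro c hc; exact hb c (by rw [hq]; exact List.mem_append.mpr (Or.inr hc))
    have hrec : pvEmitIdx payload (4 * k) = ((pvEntriesMid (q.map (fun c => (c.toNat : Int)))).reverse.map pvToLine) :=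
      ih q (chunk ++ rest) payload (by rw [hpay, hq, List.append_assoc]) hql hbq
    rcases chunk with _ | ⟨c0, _ | ⟨c1, _ | ⟨c2, _ | ⟨c3, rest'⟩⟩⟩⟩ <;> simp only [List.length_cons, List.length_nil] at hcl <;> try omega
    have hrest' : rest' = [] := by
      have : rest'.length = 0 := by omega
      exact List.length_eq_zero_iff.mp this
    subst hrest'
    rw [hdropPay, htake, hrec, hq, List.map_append,
      pv_mid_append k (q.map (fun c => (c.toNat : Int))) _ (by simp [hql])]
    have hmidc : pvEntriesMid ([c0, c1, c2, c3].map (fun c => (c.toNat : Int)))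
        = [pvEntryA [(c0.toNat : Int), (c1.toNat : Int), (c2.toNat : Int), (c3.toNat : Int)] 0] := by
      simp [pvEntriesMid]
    rw [hmidc, List.reverse_append, List.reverse_singleton, List.singleton_append, List.map_cons,
      pv_chunk_line c0 c1 c2 c3 (hbc c0 (by simp)) (hbc c1 (by simp)) (hbc c2 (by simp)) (hbc c3 (by simp))]

theorem pv_sub_idem (b : Int) : pvSub (pvSub b) = pvSub b := by
  unfold pvSub; split_ifs <;> simp_all

-- pvEntriesMid only sees bytes through pvSub, and pvSub is idempotent
theorem pv_mid_mapSub : ∀ (l : List Int), pvEntriesMid (l.map pvSub) = pvEntriesMid l := by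
  intro l
  induction l using pvEntriesMid.induct with
  | case1 b0 b1 b2 b3 rest ih =>
    simp only [List.map_cons, pvEntriesMid, ih]
    congr 1
    simp only [pvEntryA, pv_dwordA_chunk, pv_sub_idem]
  | case2 l h =>
    rcases l with _ | ⟨b0, _ | ⟨b1, _ | ⟨b2, _ | ⟨b3, rest⟩⟩⟩⟩
    · rfl
    · rfl
    · rfl
    · rfl
    · exact absurd rfl (h b0 b1 b2 b3 rest)

theorem pv_padcount (n : Nat) : (PySem.Int.mod (-(n : Int)) 4).toNat = (4 - n % 4) % 4 := by
  rw [PySem.Int.mod_eq_emod_of_pos (a := -(n:Int)) (b := 4) (by norm_num)]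
  omega

theorem pv_pad_eq (l : List Int) : pvPadA l = l ++ List.replicate ((4 - l.length % 4) % 4) 65 := by
  induction l using pvPadA.induct with
  | case1 l h ih =>
    rw [pvPadA, if_pos h, ih]
    have h65 : l ++ [(65:Int)] ++ List.replicate ((4 - (l ++ [65]).length % 4) % 4) 65
        = l ++ (65 :: List.replicate ((4 - (l.length + 1) % 4) % 4) 65) := by
      simp [List.append_assoc]
    rw [h65, show (65 : Int) :: List.replicate ((4 - (l.length + 1) % 4) % 4) 65
        = List.replicate ((4 - (l.length + 1) % 4) % 4 + 1) 65 from (List.replicate_succ ..).symm,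
      show (4 - (l.length + 1) % 4) % 4 + 1 = (4 - l.length % 4) % 4 by omega]
  | case2 l h =>
    rw [pvPadA, if_neg h, show (4 - l.length % 4) % 4 = 0 by omega]
    simp

theorem pv_pyRangeStep (k : Nat) :
    PySem.List.pyRange 0 ((4 * k : Nat) : Int) 4 = (List.range k).map (fun (t : Nat) => 4 * (t : Int)) := by
  rw [PySem.List.pyRange_of_pos 0 _ (by norm_num)]
  have count : (if (0:Int) < ((4 * k : Nat) : Int) then ((((4 * k : Nat) : Int) - 0 + 4 - 1) / 4).toNat else 0) = k := by
    split_ifs with h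
    · push_cast at *; omega
    · push_cast at h; omega
  rw [count]
  exact List.map_congr_left (fun t _ => by ring)

-- ===== VERDICT (by name: the statement is the Claim_ definition above) =====
theorem build_string_no_nulls_spec : Claim_equal_build_string_no_nulls := by
  intro s r hdom
  have hdc : ∀ c ∈ s.toList, pvDomChar c = true := by
    intro c hc
    unfold Dom_build_string_no_nulls at hdom
    simp only [Bool.and_eq_true, pvDomStr, List.all_eq_true] at hdom
    exact hdom.1 c hc
  have hcode : ∀ c ∈ s.toList, 1 ≤ c.toNat ∧ c.toNat < 128 := by
    intro c hc
    have hdcc := hdc c hc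
    unfold pvDomChar at hdcc
    simp only [Bool.or_eq_true, Bool.and_eq_true, decide_eq_true_eq, beq_iff_eq] at hdcc
    omega
  unfold Spec_build_string_no_nulls build_string_no_nulls build_string_no_nulls_alt
  dsimp only
  set n := s.toList.length with hn
  set l0 : List Int := s.toList.map (fun c => (c.toNat : Int)) ++ [0] with hl0
  set pa : List Int := pvPadA l0 with hpa
  have hl0len : l0.length = n + 1 := by simp [hl0, hn]
  set pad := (4 - l0.length % 4) % 4 with hpad
  have hpalen : pa.length = l0.length + pad := by rw [hpa, pv_pad_eq]; simp [← hpad]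
  obtain ⟨k, hk⟩ : ∃ k, pa.length = 4 * k := ⟨pa.length / 4, by omega⟩
  set payload : List Char := s.toList ++ [Char.ofNat 1]
    ++ List.replicate (PySem.Int.mod (-((n : Int) + 1)) 4).toNat 'A' with hpl
  have hpadB : (PySem.Int.mod (-((n : Int) + 1)) 4).toNat = pad := by
    have h1 : (PySem.Int.mod (-(((n+1 : Nat)) : Int)) 4).toNat = (4 - (n+1) % 4) % 4 := pv_padcount (n+1)
    have h2 : -((n:Int)+1) = -(((n+1:Nat)):Int) := by push_cast; ring
    rw [h2, h1, hpad, hl0len]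
  have hplen : payload.length = 4 * k := by
    rw [hpl]
    simp only [List.length_append, List.length_replicate, List.length_cons, List.length_nil, hpadB]
    omega
  have hpb : ∀ c ∈ payload, 1 ≤ c.toNat ∧ c.toNat < 128 := by
    intro c hc
    rw [hpl] at hc
    rcases List.mem_append.mp hc with h | h
    · rcases List.mem_append.mp h with h' | h'
      · exact hcode c h'
      · simp only [List.mem_singleton] at h'
        subst h'
        exact ⟨by decide, by decide⟩
    · rw [List.eq_of_mem_replicate h]
      exact ⟨by decide, by decide⟩
  have hmap : payload.map (fun c => (c.toNat : Int)) = pa.map pvSub := by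
    rw [hpa, pv_pad_eq l0, ← hpad, hpl, hpadB, hl0]
    simp only [List.map_append, List.map_replicate, List.map_cons, List.map_nil, List.map_map]
    have h1 : s.toList.map (pvSub ∘ fun c => (c.toNat : Int)) = s.toList.map (fun c => (c.toNat : Int)) := by
      refine List.map_congr_left ?_
      intro c hc
      simp only [Function.comp]
      have := hcode c hc
      unfold pvSub
      rw [if_pos (by omega)]
    rw [h1, show ((Char.ofNat 1).toNat : Int) = pvSub 0 from by decide,
      show (('A'.toNat : Int)) = pvSub 65 from by decide]
  have hmid : pvEntriesMid (payload.map (fun c => (c.toNat : Int))) = pvEntriesMid pa := by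
    rw [hmap, pv_mid_mapSub]
  have hemit : pvEmitIdx payload payload.length = ((pvEntriesMid (payload.map (fun c => (c.toNat : Int)))).reverse.map pvToLine) := by
    rw [hplen]
    exact pv_emitIdx_eq k payload [] payload (by simp) hplen hpb
  rw [hemit, hmid]
  have hni : ((l0.length : Nat) : Int) - 1 = (n : Int) := by rw [hl0len]; push_cast; ring
  rw [hni]
  rw [PySem.List.foldl_append_singleton_eq_map (f := fun i => PySem.Int.band (pvDwordA pa i) 4294967295), List.nil_append,
    show ((pa.length : Int)) = ((4 * k : Nat) : Int) by rw [hk], pv_pyRangeStep k]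
  have hdw : ((List.range k).map (fun (t:Nat) => 4 * (t:Int))).map (fun i => PySem.Int.band (pvDwordA pa i) 4294967295)
      = (pvEntriesMid pa).map Prod.fst := by
    rw [List.map_map, ← pv_entries k pa hk, List.map_map]
    rfl
  rw [hdw]
  rw [PySem.List.foldl_append_singleton_eq_map, List.nil_append]
  have hen : ∀ {β : Type} (E : List Int) (F : Int × Int → β), (∀ a b x, F (a, x) = F (b, x)) →
      (PySem.List.enumerate E 0).map F = E.map (fun x => F (0, x)) := by
    intro β E F h
    conv_rhs => rw [show E = (PySem.List.enumerate E 0).map Prod.snd from (PySem.List.map_snd_enumerate E 0).symm]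
    rw [List.map_map]
    refine List.map_congr_left ?_
    intro p _
    simp only [Function.comp]
    rw [h 0 p.1 p.2]
  rw [hen _ _ (fun a b x => rfl), ← List.map_reverse, List.map_map]
  congr 1
  congr 1
  congr 1
  refine List.map_congr_left ?_
  intro e hmem
  rw [List.mem_reverse] at hmem
  rw [← pv_entries k pa hk] at hmem
  obtain ⟨t, _, rfl⟩ := List.mem_map.mp hmem
  rfl
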